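-- pv_equiv track=rewrite | github.com/sanju-k1/Nano-satellite | final.py | newFile
-- ===== SOURCE A (Python) =====
-- def newFile(existing_files):
--     # Creating a new file name based on existing files
--     base_name = "data"
--     extension = ".csv"
--     counter = 1
--     while True:
--         new_name = f"{base_name}_{counter}{extension}"
--         if new_name not in existing_files:
--             return f"/sd/{new_name}"
--         counter += 1
-- ===== SOURCE B (Python) =====
-- def newFile(existing_files):
--     # Build an index of the middle parts of all "data_*.csv" names once,
--     # then gap-search for the smallest counter whose name is unused.
--     used = set()
--     for name in existing_files:
--         if name.startswith("data_") and name.endswith(".csv") and len(name) >= 9: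
--             used.add(name[5:-4])
--     n = 1
--     while str(n) in used:
--         n += 1
--     return f"/sd/data_{n}.csv"
-- ===== Notes on version B (the rewrite author's own statement) =====
-- stated objective: alternative
-- what changed: Instead of regenerating each candidate name and linearly scanning existing_files for it, B scans existing_files once, collecting the middle parts of all data_*.csv names into a set, then gap-searches the smallest counter whose decimal string is not in that set.
import Mathlib
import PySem

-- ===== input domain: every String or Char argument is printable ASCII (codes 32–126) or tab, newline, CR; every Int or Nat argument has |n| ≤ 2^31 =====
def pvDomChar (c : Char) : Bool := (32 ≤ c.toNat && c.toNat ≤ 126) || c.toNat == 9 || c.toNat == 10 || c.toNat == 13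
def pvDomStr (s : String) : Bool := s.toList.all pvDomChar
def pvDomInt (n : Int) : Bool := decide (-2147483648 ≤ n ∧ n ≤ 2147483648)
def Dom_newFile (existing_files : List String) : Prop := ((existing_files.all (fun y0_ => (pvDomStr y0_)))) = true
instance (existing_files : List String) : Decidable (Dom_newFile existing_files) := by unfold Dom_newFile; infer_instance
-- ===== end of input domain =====

-- B replaces A's probe-every-candidate loop by a one-pass index of the used "data_*.csv"
-- middle parts followed by a gap search (objective: alternative algorithm, same result).

-- ===== PORT A =====
-- A's `while True` loop; it always returns within existing_files.length + 1 iterations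
-- (that many distinct candidate names cannot all be in the list), so the fuel bound only
-- makes the same computation total and the fuel-0 branch is unreachable.
def newFileLoopA (existing_files : List String) (counter : Int) (fuel : Nat) : String :=
  match fuel with
  | 0 => ""
  | f + 1 =>
    let new_name : List Char := "data_".toList ++ PySem.Int.toChars counter ++ ".csv".toList
    if existing_files.contains (String.ofList new_name) then
      newFileLoopA existing_files (counter + 1) f
    else
      String.ofList ("/sd/".toList ++ new_name)

def newFile (existing_files : List String) : String :=
  newFileLoopA existing_files 1 (existing_files.length + 1)

-- ===== PORT B =====
-- the set `used` of Source B: middle parts name[5:-4] of the names that look like data_*.csv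
def usedMids (existing_files : List String) : PySem.Set String :=
  existing_files.foldl (fun s name =>
    if PySem.Str.startswith name "data_" && PySem.Str.endswith name ".csv"
        && decide (9 ≤ PySem.Str.len name) then
      PySem.Set.add s (PySem.Str.slice name (some 5) (some (-4)))
    else s) PySem.Set.empty

-- Source B's `while str(n) in used` loop, with the same unreachable fuel bound as A's port
def newFileLoopB (used : PySem.Set String) (n : Int) (fuel : Nat) : String :=
  match fuel with
  | 0 => ""
  | f + 1 =>
    if PySem.Set.contains used (PySem.Int.toStr n) then
      newFileLoopB used (n + 1) f
    else
      String.ofList ("/sd/data_".toList ++ PySem.Int.toChars n ++ ".csv".toList)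

def newFile_alt (existing_files : List String) : String :=
  newFileLoopB (usedMids existing_files) 1 (existing_files.length + 1)

-- ===== PRECONDITION & SPEC =====
def Spec_newFile (existing_files : List String) (out : String) : Prop := out = newFile_alt existing_files
instance (existing_files : List String) (out : String) : Decidable (Spec_newFile existing_files out) := by unfold Spec_newFile; infer_instance

-- ===== CLAIM (what is proved, stated in full; the proofs are below) =====
def Claim_equal_newFile : Prop := ∀ (existing_files : List String), Dom_newFile existing_files → Spec_newFile existing_files (newFile existing_files)

-- ===== LEMMAS AND PROOFS =====

-- slicing [5:-4] out of a 5 ++ mid ++ 4 decomposition returns mid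
theorem slice_mid (p m q : List Char) (hp : p.length = 5) (hq : q.length = 4) :
    PySem.List.slice (p ++ m ++ q) (some 5) (some (-4)) = m := by
  have hlen : (p ++ m ++ q).length = 9 + m.length := by simp [hp, hq]; omega
  simp only [PySem.List.slice, PySem.List.clampIdx, hlen]
  norm_num
  rw [if_neg (by omega)]
  have h1 : ((9 : Int) + m.length + -4).toNat = 5 + m.length := by omega
  have h2 : (min (5 : Int).toNat (9 + m.length)) = 5 := by omega
  have h3 : 5 + m.length - 5 = m.length := by omega
  rw [h1, h2, h3, ← hp, List.drop_left, List.take_left]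

-- a string with prefix "data_", suffix ".csv" and length ≥ 9 decomposes around its [5:-4] slice
theorem decomp (L : List Char) (h1 : "data_".toList <+: L) (h2 : ".csv".toList <:+ L)
    (h9 : 9 ≤ L.length) :
    L = "data_".toList ++ PySem.List.slice L (some 5) (some (-4)) ++ ".csv".toList := by
  obtain ⟨r, hr⟩ := h1
  obtain ⟨t, ht⟩ := h2
  have hrl : r.length = L.length - 5 := by
    have := congrArg List.length hr; simp at this; omega
  have hdec : r = r.take (r.length - 4) ++ ".csv".toList := by
    have hdrop : r.drop (r.length - 4) = ".csv".toList := by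
      have e1 : L.drop (L.length - 4) = ".csv".toList := by
        rw [← ht]
        have e : (t ++ ".csv".toList).length - 4 = t.length := by simp
        rw [e, List.drop_left]
      have e2 : L.drop (L.length - 4) = r.drop (r.length - 4) := by
        conv_lhs => rw [← hr]
        rw [List.drop_append, List.drop_eq_nil_of_le (by simp; omega), List.nil_append]
        congr 1
      rw [← e2, e1]
    conv_lhs => rw [← List.take_append_drop (r.length - 4) r]
    rw [hdrop]
  have hL : L = "data_".toList ++ r.take (r.length - 4) ++ ".csv".toList := by
    rw [List.append_assoc, ← hdec, hr]
  rw [hL, slice_mid _ _ _ (by decide) (by decide)]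

-- one file matches A's candidate name iff it passes B's filter with the matching middle part
theorem file_iff (f : String) (n : Int) :
    ((PySem.Str.startswith f "data_" && PySem.Str.endswith f ".csv"
        && decide (9 ≤ PySem.Str.len f)) = true
      ∧ PySem.Str.slice f (some 5) (some (-4)) = PySem.Int.toStr n)
    ↔ f = String.ofList ("data_".toList ++ PySem.Int.toChars n ++ ".csv".toList) := by
  constructor
  · rintro ⟨hg, hsl⟩
    simp only [Bool.and_eq_true, decide_eq_true_eq, PySem.Str.startswith_eq,
      PySem.Str.endswith_eq, PySem.Chars.startswith_iff, PySem.Chars.endswith_iff,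
      PySem.Str.len_eq] at hg
    obtain ⟨⟨h1, h2⟩, h9⟩ := hg
    have h9' : 9 ≤ f.toList.length := by exact_mod_cast h9
    have hd := decomp f.toList h1 h2 h9'
    have hslL : PySem.List.slice f.toList (some 5) (some (-4)) = PySem.Int.toChars n := by
      rw [← PySem.Chars.slice_eq_listSlice, ← PySem.Str.toList_slice, hsl, PySem.Int.toList_toStr]
    rw [hslL] at hd
    rw [← String.ofList_toList (s := f), hd]
  · rintro rfl
    have htl : (String.ofList ("data_".toList ++ PySem.Int.toChars n ++ ".csv".toList)).toList
        = "data_".toList ++ PySem.Int.toChars n ++ ".csv".toList := String.toList_ofList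
    constructor
    · simp only [Bool.and_eq_true, decide_eq_true_eq, PySem.Str.startswith_eq,
        PySem.Str.endswith_eq, PySem.Chars.startswith_iff, PySem.Chars.endswith_iff,
        PySem.Str.len_eq, htl]
      refine ⟨⟨⟨_, rfl⟩, ?_⟩, ?_⟩
      · exact List.suffix_append _ _
      · simp; omega
    · apply String.toList_injective
      rw [PySem.Str.toList_slice, PySem.Chars.slice_eq_listSlice, htl,
        slice_mid _ _ _ (by decide) (by decide), PySem.Int.toList_toStr]

-- membership in the foldl-built set, accumulator generalized
theorem mem_foldl_used (files : List String) (s : PySem.Set String) (x : String) :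
    x ∈ files.foldl (fun s name =>
      if PySem.Str.startswith name "data_" && PySem.Str.endswith name ".csv"
          && decide (9 ≤ PySem.Str.len name) then
        PySem.Set.add s (PySem.Str.slice name (some 5) (some (-4)))
      else s) s
    ↔ x ∈ s ∨ ∃ f ∈ files,
        (PySem.Str.startswith f "data_" && PySem.Str.endswith f ".csv"
          && decide (9 ≤ PySem.Str.len f)) = true
        ∧ PySem.Str.slice f (some 5) (some (-4)) = x := by
  induction files generalizing s with
  | nil => simp
  | cons f fs ih =>
    simp only [List.foldl_cons, ih]
    by_cases hg : (PySem.Str.startswith f "data_" && PySem.Str.endswith f ".csv"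
        && decide (9 ≤ PySem.Str.len f)) = true
    · rw [if_pos hg]
      rw [PySem.Set.mem_add]
      constructor
      · rintro ((h | h) | h)
        · exact Or.inl h
        · exact Or.inr ⟨f, List.mem_cons_self .., hg, h.symm⟩
        · obtain ⟨g, hm, hgg⟩ := h
          exact Or.inr ⟨g, List.mem_cons_of_mem _ hm, hgg⟩
      · rintro (h | ⟨g, hm, hgg, hsl⟩)
        · exact Or.inl (Or.inl h)
        · rcases List.mem_cons.mp hm with rfl | hm
          · exact Or.inl (Or.inr hsl.symm)
          · exact Or.inr ⟨g, hm, hgg, hsl⟩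
    · rw [if_neg hg]
      constructor
      · rintro (h | ⟨g, hm, hgg, hsl⟩)
        · exact Or.inl h
        · exact Or.inr ⟨g, List.mem_cons_of_mem _ hm, hgg, hsl⟩
      · rintro (h | ⟨g, hm, hgg, hsl⟩)
        · exact Or.inl h
        · rcases List.mem_cons.mp hm with rfl | hm
          · exact absurd hgg hg
          · exact Or.inr ⟨g, hm, hgg, hsl⟩

-- the two loop conditions agree
theorem cond_eq (files : List String) (n : Int) :
    PySem.Set.contains (usedMids files) (PySem.Int.toStr n)
      = files.contains (String.ofList ("data_".toList ++ PySem.Int.toChars n ++ ".csv".toList)) := by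
  have h := mem_foldl_used files PySem.Set.empty (PySem.Int.toStr n)
  rw [Bool.eq_iff_iff]
  unfold usedMids
  rw [PySem.Set.contains, List.contains_iff_mem, h, List.contains_iff_mem]
  simp only [PySem.Set.empty, List.not_mem_nil, false_or]
  constructor
  · rintro ⟨f, hm, hgg, hsl⟩
    rwa [← (file_iff f n).mp ⟨hgg, hsl⟩]
  · intro hm
    exact ⟨_, hm, (file_iff _ n).mpr rfl⟩

-- the two loops return the same string at every fuel and counter
theorem loops_eq (files : List String) (fuel : Nat) (c : Int) :
    newFileLoopA files c fuel = newFileLoopB (usedMids files) c fuel := by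
  induction fuel generalizing c with
  | zero => rfl
  | succ f ih =>
    simp only [newFileLoopA, newFileLoopB, cond_eq files c]
    split
    · exact ih (c + 1)
    · rfl

-- ===== VERDICT (by name: the statement is the Claim_ definition above) =====
theorem newFile_spec : Claim_equal_newFile := by
  intro files _
  unfold Spec_newFile newFile newFile_alt
  exact loops_eq files (files.length + 1) 1
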